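-- pv_equiv track=rewrite | github.com/Rajachainscript/NLP-Task | task_1.py | string_reduce
-- ===== SOURCE A (Python) =====
-- def string_reduce(s):
--     stack = []
--
--     for i in s:
--         if stack:
--             char = stack[-1]
--             if char.lower()==i.lower():
--                 stack.pop()
--             else:
--                 stack.append(i)
--         else:
--             stack.append(i)
--
--     return "".join(stack)
-- ===== SOURCE B (Python) =====
-- # B: fixpoint reduction — repeatedly delete the FIRST case-insensitively matching
-- # adjacent pair and rescan, stopping when a pass finds none (no stack).
-- def string_reduce(s):
--     while True:
--         i = 0
--         n = len(s)
--         while i + 1 < n and s[i].lower() != s[i + 1].lower():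
--             i += 1
--         if i + 1 >= n:
--             return s
--         s = s[:i] + s[i + 2:]
-- ===== Notes on version B (the rewrite author's own statement) =====
-- stated objective: alternative
-- what changed: Replaced the single-pass stack reduction by a fixpoint loop that repeatedly finds the first case-insensitively matching adjacent pair, removes it by string slicing, and rescans until no pair remains.
import Mathlib
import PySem

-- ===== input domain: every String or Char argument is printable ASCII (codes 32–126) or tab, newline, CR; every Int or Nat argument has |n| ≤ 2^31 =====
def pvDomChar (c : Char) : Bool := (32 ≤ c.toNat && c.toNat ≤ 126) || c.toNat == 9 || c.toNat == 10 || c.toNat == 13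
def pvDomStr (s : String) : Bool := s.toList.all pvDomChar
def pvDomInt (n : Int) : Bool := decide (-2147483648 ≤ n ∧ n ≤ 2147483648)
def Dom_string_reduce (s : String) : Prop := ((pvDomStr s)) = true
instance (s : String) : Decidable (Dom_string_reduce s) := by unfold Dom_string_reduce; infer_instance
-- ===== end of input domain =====

-- B replaces A's stack pass by a fixpoint loop deleting the first case-insensitive
-- adjacent pair and rescanning (objective: alternative algorithm, not faster).

-- ===== PORT A =====
-- stack kept head = top (Python's stack[-1]); joined bottom-to-top at the end via reverse
def redStep (stack : List Char) (c : Char) : List Char :=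
  match stack with
  | [] => [c]
  | ch :: rest =>
      if PySem.Chars.lowerChar ch == PySem.Chars.lowerChar c then rest
      else c :: ch :: rest

def string_reduce (s : String) : String :=
  String.ofList ((s.toList.foldl redStep []).reverse)

-- ===== PORT B =====
-- the inner scan of Source B: first adjacent matching pair removed, none if no pair
def scanRemove : List Char → Option (List Char)
  | a :: b :: t =>
      if PySem.Chars.lowerChar a == PySem.Chars.lowerChar b then some t
      else (scanRemove (b :: t)).map (a :: ·)
  | _ => none

lemma scanRemove_length : ∀ {l l' : List Char}, scanRemove l = some l' → l'.length + 2 = l.length := by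
  intro l
  induction l with
  | nil => intro l' h; simp [scanRemove] at h
  | cons a t ih =>
    cases t with
    | nil => intro l' h; simp [scanRemove] at h
    | cons b t2 =>
      intro l' h
      by_cases hm : PySem.Chars.lowerChar a == PySem.Chars.lowerChar b
      · simp [scanRemove, hm] at h; subst h; simp
      · simp [scanRemove, hm] at h
        obtain ⟨t', ht', rfl⟩ := h
        have := ih ht'
        simp at this ⊢
        omega

-- the outer while-loop of Source B
def fixred (l : List Char) : List Char :=
  match _h : scanRemove l with
  | some l' => fixred l'
  | none => l
termination_by l.length
decreasing_by
  have := scanRemove_length _h; omega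

def string_reduce_alt (s : String) : String :=
  String.ofList (fixred s.toList)

-- ===== PRECONDITION & SPEC =====
def Spec_string_reduce (s : String) (out : String) : Prop := out = string_reduce_alt s
instance (s : String) (out : String) : Decidable (Spec_string_reduce s out) := by unfold Spec_string_reduce; infer_instance

-- ===== CLAIM (what is proved, stated in full; the proofs are below) =====
def Claim_equal_string_reduce : Prop := ∀ (s : String), Dom_string_reduce s → Spec_string_reduce s (string_reduce s)

-- ===== LEMMAS AND PROOFS =====

-- the stack top does not match the next input character
def compat : List Char → List Char → Bool
  | a :: _, h :: _ => !(PySem.Chars.lowerChar a == PySem.Chars.lowerChar h)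
  | _, _ => true

lemma compat_nil (l : List Char) : compat [] l = true := by
  cases l <;> rfl

lemma fixred_none {l : List Char} (h : scanRemove l = none) : fixred l = l := by
  rw [fixred, h]

lemma fixred_some {l l' : List Char} (h : scanRemove l = some l') : fixred l = fixred l' := by
  rw [fixred, h]

-- deleting the first pair does not change the stack result
lemma key : ∀ (l : List Char) (l' st : List Char), scanRemove l = some l' → compat st l = true →
    List.foldl redStep st l = List.foldl redStep st l' := by
  intro l
  induction l with
  | nil => intro l' st h _; simp [scanRemove] at h
  | cons a t ih =>
    cases t with
    | nil => intro l' st h _; simp [scanRemove] at h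
    | cons b t2 =>
      intro l' st h hc
      by_cases hm : PySem.Chars.lowerChar a == PySem.Chars.lowerChar b
      · simp [scanRemove, hm] at h
        subst h
        cases st with
        | nil => simp [redStep, hm]
        | cons c s =>
          have hca : (PySem.Chars.lowerChar c == PySem.Chars.lowerChar a) = false := by
            simpa [compat] using hc
          simp [redStep, hca, hm]
      · simp [scanRemove, hm] at h
        obtain ⟨t', ht', rfl⟩ := h
        have hpush : redStep st a = a :: st := by
          cases st with
          | nil => rfl
          | cons c s =>
            have hca : (PySem.Chars.lowerChar c == PySem.Chars.lowerChar a) = false := by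
              simpa [compat] using hc
            simp [redStep, hca]
        have hcomp : compat (a :: st) (b :: t2) = true := by
          simp [compat, hm]
        simp only [List.foldl_cons, hpush]
        exact ih t' (a :: st) ht' hcomp

-- a pair-free string passes through the stack untouched
lemma fold_none : ∀ (l st : List Char), scanRemove l = none → compat st l = true →
    List.foldl redStep st l = l.reverse ++ st := by
  intro l
  induction l with
  | nil => intro st _ _; simp
  | cons a t ih =>
    cases t with
    | nil =>
      intro st _ hc
      cases st with
      | nil => simp [redStep]
      | cons c s =>
        have hca : (PySem.Chars.lowerChar c == PySem.Chars.lowerChar a) = false := by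
          simpa [compat] using hc
        simp [redStep, hca]
    | cons b t2 =>
      intro st h hc
      have hm : (PySem.Chars.lowerChar a == PySem.Chars.lowerChar b) = false := by
        by_cases hm : PySem.Chars.lowerChar a == PySem.Chars.lowerChar b
        · simp [scanRemove, hm] at h
        · simpa using hm
      have ht : scanRemove (b :: t2) = none := by
        simp [scanRemove, hm] at h
        simpa using h
      have hpush : redStep st a = a :: st := by
        cases st with
        | nil => rfl
        | cons c s =>
          have hca : (PySem.Chars.lowerChar c == PySem.Chars.lowerChar a) = false := by
            simpa [compat] using hc
          simp [redStep, hca]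
      have hcomp : compat (a :: st) (b :: t2) = true := by
        simp [compat, hm]
      simp only [List.foldl_cons, hpush]
      have h2 := ih (a :: st) ht hcomp
      simp only [List.foldl_cons] at h2
      rw [h2]
      simp

lemma main : ∀ (n : Nat) (l : List Char), l.length ≤ n →
    List.foldl redStep [] l = (fixred l).reverse := by
  intro n
  induction n with
  | zero =>
    intro l hl
    have : l = [] := List.eq_nil_of_length_eq_zero (Nat.le_zero.mp hl)
    subst this
    rw [fixred_none (by rfl)]
    rfl
  | succ n ih =>
    intro l hl
    cases h : scanRemove l with
    | none =>
      rw [fixred_none h, fold_none l [] h (compat_nil l)]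
      simp
    | some l' =>
      rw [key l l' [] h (compat_nil l), fixred_some h]
      exact ih l' (by have := scanRemove_length h; omega)

-- ===== VERDICT (by name: the statement is the Claim_ definition above) =====
theorem string_reduce_spec : Claim_equal_string_reduce := by
  intro s _
  unfold Spec_string_reduce string_reduce string_reduce_alt
  rw [main s.toList.length s.toList le_rfl]
  simp
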